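-- pv_equiv track=rewrite | github.com/mgayane/mutable_string_byme | mutablestring.py | chr
-- ===== SOURCE A (Python) =====
-- from string import ascii_uppercase, ascii_lowercase, digits, punctuation
--
-- def chr(d):
--     if not isinstance(d, int):
--         raise TypeError(f'int expected {type(d)} found')
--
--     dicts = {}
--     v = 97
--     u = 65
--
--     for i, j in enumerate(ascii_lowercase):
--         dicts[j] = v + i
--     for i, j in enumerate(ascii_uppercase):
--         dicts[j] = u + i
--
--     res = 0
--     for key, val in dicts.items():
--         if d == val:
--             res = key
--
--     if not isinstance(res, str):
--         raise ValueError(f'{d} not found')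
--     else:
--         return res
-- ===== SOURCE B (Python) =====
-- from string import ascii_uppercase, ascii_lowercase, digits, punctuation
--
-- def chr(d):
--     if not isinstance(d, int):
--         raise TypeError(f'int expected {type(d)} found')
--     if 65 <= d <= 90:
--         return ascii_uppercase[d - 65]
--     elif 97 <= d <= 122:
--         return ascii_lowercase[d - 97]
--     raise ValueError(f'{d} not found')
-- ===== Notes on version B (the rewrite author's own statement) =====
-- stated objective: simpler
-- what changed: B drops the letter-to-code dict build and the linear scan over its items, computing the letter by direct arithmetic indexing into the alphabet strings after two range checks.
import Mathlib
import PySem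

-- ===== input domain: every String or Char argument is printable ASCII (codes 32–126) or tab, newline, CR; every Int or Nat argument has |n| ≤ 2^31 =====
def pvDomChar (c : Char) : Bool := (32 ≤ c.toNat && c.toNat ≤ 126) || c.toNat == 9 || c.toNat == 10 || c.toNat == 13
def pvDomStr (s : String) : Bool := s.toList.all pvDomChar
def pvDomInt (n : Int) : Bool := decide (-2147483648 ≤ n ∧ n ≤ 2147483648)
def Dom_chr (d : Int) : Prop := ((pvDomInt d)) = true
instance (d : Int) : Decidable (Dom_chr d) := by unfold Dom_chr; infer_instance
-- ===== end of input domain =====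

set_option maxRecDepth 4000


-- B replaces A's 52-entry dict build + full linear scan by two range checks and
-- direct arithmetic indexing into the alphabet strings (objective: simpler).
-- Pre_chr excludes the codes on which A raises ValueError (no letter found);
-- the TypeError branch is outside the Int signature and needs no exclusion.

-- ===== PORT A =====
-- ascii_lowercase / ascii_uppercase as character lists
def chrLower : List Char := ['a', 'b', 'c', 'd', 'e', 'f', 'g', 'h', 'i', 'j', 'k', 'l', 'm', 'n', 'o', 'p', 'q', 'r', 's', 't', 'u', 'v', 'w', 'x', 'y', 'z']
def chrUpper : List Char := ['A', 'B', 'C', 'D', 'E', 'F', 'G', 'H', 'I', 'J', 'K', 'L', 'M', 'N', 'O', 'P', 'Q', 'R', 'S', 'T', 'U', 'V', 'W', 'X', 'Y', 'Z']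

def chr (d : Int) : String :=
  -- dicts = {}; v = 97; u = 65; the two enumerate loops insert (letter, code)
  let dicts : PySem.Dict Char Int :=
    let d1 := (PySem.List.enumerate chrLower).foldl
      (fun acc ij => acc.insert ij.2 (97 + (ij.1 : Int))) (PySem.Dict.empty)
    (PySem.List.enumerate chrUpper).foldl
      (fun acc ij => acc.insert ij.2 (65 + (ij.1 : Int))) d1
  -- res = 0; for key, val in dicts.items(): if d == val: res = key
  let res : Option Char :=
    dicts.items.foldl (fun r kv => if d == kv.2 then some kv.1 else r) none
  -- 'if not isinstance(res, str): raise ValueError' — the none case raises,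
  -- excluded by Pre_chr; "" stands for the unreached raise
  match res with
  | some c => String.ofList [c]
  | none => ""

-- ===== PORT B =====
def chr_alt (d : Int) : String :=
  if 65 ≤ d ∧ d ≤ 90 then
    -- ascii_uppercase[d-65]
    ((PySem.List.pyGet? chrUpper (d - 65)).map (fun c => String.ofList [c])).getD ""
  else if 97 ≤ d ∧ d ≤ 122 then
    -- ascii_lowercase[d-97]
    ((PySem.List.pyGet? chrLower (d - 97)).map (fun c => String.ofList [c])).getD ""
  else
    "" -- raise ValueError: excluded by Pre_chr

-- ===== PRECONDITION & SPEC =====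
-- Pre_chr: exactly the codes of ASCII letters; elsewhere A raises ValueError.
def Pre_chr (d : Int) : Prop := (65 ≤ d ∧ d ≤ 90) ∨ (97 ≤ d ∧ d ≤ 122)
instance (d : Int) : Decidable (Pre_chr d) := by unfold Pre_chr; infer_instance
def pvWitness_chr : Int := 97

def Spec_chr (d : Int) (out : String) : Prop := out = chr_alt d
instance (d : Int) (out : String) : Decidable (Spec_chr d out) := by unfold Spec_chr; infer_instance

-- ===== CLAIM (what is proved, stated in full; the proofs are below) =====
def Claim_equal_chr : Prop := ∀ (d : Int), Dom_chr d → Pre_chr d → Spec_chr d (chr d)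

-- ===== LEMMAS AND PROOFS =====

-- ===== VERDICT (by name: the statement is the Claim_ definition above) =====
theorem chr_spec : Claim_equal_chr := by
  intro d _ hpre
  unfold Pre_chr at hpre
  rcases hpre with ⟨h1, h2⟩ | ⟨h1, h2⟩ <;> interval_cases d <;> decide
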